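-- pv_equiv track=rewrite | github.com/dzhao14/HackerRank_code | competitions/Week_of_Code_32/fight_the_monsters.py | solution
-- ===== SOURCE A (Python) =====
-- import math
--
-- def solution(healths, hit, t):
--     healths.sort()
--     monster = 0
--     count = 0
--     while t > 0:
--         if monster == len(healths):
--             break;
--         needed = math.ceil(healths[monster] / hit)
--         if needed <= t:
--             count += 1
--             t -= needed
--             monster += 1
--         else:
--             break
--
--     return count
-- ===== SOURCE B (Python) =====
-- import math
-- from bisect import bisect_right
-- from itertools import accumulate
--
-- def solution(healths, hit, t):
--     healths.sort()
--     if t <= 0: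
--         return 0
--     prefix = list(accumulate(math.ceil(h / hit) for h in healths))
--     return bisect_right(prefix, t)
-- ===== Notes on version B (the rewrite author's own statement) =====
-- stated objective: alternative
-- what changed: A decrements the budget in a linear greedy while-loop over the sorted healths; B instead builds the prefix sums of the per-monster hit counts (itertools.accumulate) and returns bisect_right(prefix, t), a binary search, guarded by t <= 0.
-- outside the precondition, e.g. on solution([-3, 5], -1, 1): A returns 0, B returns 2
import Mathlib
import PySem

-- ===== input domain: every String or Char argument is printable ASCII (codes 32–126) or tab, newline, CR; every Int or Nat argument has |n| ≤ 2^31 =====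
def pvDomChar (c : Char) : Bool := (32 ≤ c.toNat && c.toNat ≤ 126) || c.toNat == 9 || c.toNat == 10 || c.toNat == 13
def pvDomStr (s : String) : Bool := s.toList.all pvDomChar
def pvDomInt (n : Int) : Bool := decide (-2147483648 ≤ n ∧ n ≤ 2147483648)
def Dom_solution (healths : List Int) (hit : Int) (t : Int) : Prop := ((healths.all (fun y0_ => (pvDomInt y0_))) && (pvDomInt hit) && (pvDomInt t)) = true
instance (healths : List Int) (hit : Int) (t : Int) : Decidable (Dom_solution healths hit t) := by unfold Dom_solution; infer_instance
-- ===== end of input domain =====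

-- B replaces A's budget-decrementing greedy scan by prefix sums + bisect_right (objective: alternative).
-- Both implementations sort `healths` in place; the equivalence proved here is about the return value.

-- ===== PORT A =====
-- math.ceil(a / b): exact ceiling division; on Dom (|a|,|b| ≤ 2^31, b ≠ 0) Python's float
-- division never rounds across an integer, so math.ceil(a/b) == -((-a)//b) exactly.
def pvCeil (a b : Int) : Int := -(PySem.Int.floordiv (-a) b)

-- the `while t > 0` loop of A over the sorted list, `count` as 1 + recursion
def solutionLoop (hit : Int) : List Int → Int → Int
  | [], _ => 0
  | h :: rest, t =>
    if 0 < t then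
      if pvCeil h hit ≤ t then 1 + solutionLoop hit rest (t - pvCeil h hit) else 0
    else 0

def solution (healths : List Int) (hit : Int) (t : Int) : Int :=
  solutionLoop hit (PySem.List.sorted healths (fun x => x)) t

-- ===== PORT B =====
-- itertools.accumulate of the per-monster costs, running total a
def pvAcc (a : Int) : List Int → List Int
  | [] => []
  | c :: cs => (a + c) :: pvAcc (a + c) cs

def solution_alt (healths : List Int) (hit : Int) (t : Int) : Int :=
  let s := PySem.List.sorted healths (fun x => x)
  if t ≤ 0 then 0
  else ((PySem.List.bisectRight (pvAcc 0 (s.map (fun h => pvCeil h hit))) t : Nat) : Int)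

-- ===== PRECONDITION & SPEC =====
-- Pre_ keeps the problem's natural domain: hit = 0 makes A raise ZeroDivisionError; hit < 0
-- (a "hit" that heals) is outside the task's meaning and there A's greedy over a then
-- non-monotone cost sequence and B's binary search legitimately disagree — excluded, not matched.
def Pre_solution (healths : List Int) (hit : Int) (t : Int) : Prop := 1 ≤ hit
instance (healths : List Int) (hit : Int) (t : Int) : Decidable (Pre_solution healths hit t) := by unfold Pre_solution; infer_instance
def pvWitness_solution : List Int × Int × Int := ([1, 2, 3], 2, 3)

def Spec_solution (healths : List Int) (hit : Int) (t : Int) (out : Int) : Prop := out = solution_alt healths hit t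
instance (healths : List Int) (hit : Int) (t : Int) (out : Int) : Decidable (Spec_solution healths hit t out) := by unfold Spec_solution; infer_instance

-- ===== CLAIM (what is proved, stated in full; the proofs are below) =====
def Claim_equal_solution : Prop := ∀ (healths : List Int) (hit : Int) (t : Int), Dom_solution healths hit t → Pre_solution healths hit t → Spec_solution healths hit t (solution healths hit t)

-- ===== LEMMAS AND PROOFS =====

lemma pvAcc_length (a : Int) (cs : List Int) : (pvAcc a cs).length = cs.length := by
  induction cs generalizing a with
  | nil => rfl
  | cons c cs ih => simp [pvAcc, ih]

-- every running total over costs ≥ 1 strictly exceeds the start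
lemma pvAcc_mem_ge (cs : List Int) (b : Int) (h1 : ∀ c ∈ cs, (1:Int) ≤ c) :
    ∀ v ∈ pvAcc b cs, b + 1 ≤ v := by
  induction cs generalizing b with
  | nil => simp [pvAcc]
  | cons c cs ih =>
    intro v hv
    simp only [pvAcc, List.mem_cons] at hv
    rcases hv with rfl | hv
    · have := h1 c (by simp); omega
    · have hc := h1 c (by simp)
      have := ih (b + c) (fun x hx => h1 x (by simp [hx])) v hv
      omega

-- every running total over costs ≥ 0 is at least the start
lemma pvAcc_mem_ge0 (cs : List Int) (b : Int) (h1 : ∀ c ∈ cs, (0:Int) ≤ c) :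
    ∀ v ∈ pvAcc b cs, b ≤ v := by
  induction cs generalizing b with
  | nil => simp [pvAcc]
  | cons c cs ih =>
    intro v hv
    simp only [pvAcc, List.mem_cons] at hv
    rcases hv with rfl | hv
    · have := h1 c (by simp); omega
    · have hc := h1 c (by simp)
      have := ih (b + c) (fun x hx => h1 x (by simp [hx])) v hv
      omega

-- valley property: once a prefix sum of nondecreasing costs is back at/above the start,
-- it never drops below that value again
lemma pvAcc_valley (cs : List Int) (hp : cs.Pairwise (· ≤ ·)) :
    ∀ (a : Int) (i j : Nat) (hi : i < (pvAcc a cs).length) (hj : j < (pvAcc a cs).length),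
      i ≤ j → a ≤ (pvAcc a cs)[i] → (pvAcc a cs)[i] ≤ (pvAcc a cs)[j] := by
  induction cs with
  | nil => intro a i j hi; simp [pvAcc] at hi
  | cons c cs ih =>
    intro a i j hi hj hij hge
    rcases List.pairwise_cons.mp hp with ⟨hhead, htail⟩
    cases i with
    | zero =>
      cases j with
      | zero => simp
      | succ j =>
        simp only [pvAcc, List.getElem_cons_zero, List.getElem_cons_succ] at *
        have hc : 0 ≤ c := by omega
        have hall : ∀ x ∈ cs, (0:Int) ≤ x := fun x hx => le_trans hc (hhead x hx)
        exact pvAcc_mem_ge0 cs (a + c) hall _ (List.getElem_mem _)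
    | succ i =>
      cases j with
      | zero => omega
      | succ j =>
        have hlen : (pvAcc a (c :: cs)).length = cs.length + 1 := by
          simp [pvAcc, pvAcc_length]
        have hi' : i < (pvAcc (a + c) cs).length := by rw [pvAcc_length]; omega
        have hj' : j < (pvAcc (a + c) cs).length := by rw [pvAcc_length]; omega
        have ei : (pvAcc a (c :: cs))[i + 1]'hi = (pvAcc (a + c) cs)[i]'hi' := by
          simp [pvAcc]
        have ej : (pvAcc a (c :: cs))[j + 1]'hj = (pvAcc (a + c) cs)[j]'hj' := by
          simp [pvAcc]
        rw [ei, ej]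
        rw [ei] at hge
        by_cases hac : a + c ≤ (pvAcc (a + c) cs)[i]'hi'
        · exact ih htail (a + c) i j hi' hj' (by omega) hac
        · exfalso
          by_cases hc : 0 ≤ c
          · have hall : ∀ x ∈ cs, (0:Int) ≤ x := fun x hx => le_trans hc (hhead x hx)
            have := pvAcc_mem_ge0 cs (a + c) hall _
              (List.getElem_mem (l := pvAcc (a + c) cs) (n := i) (h := hi'))
            omega
          · -- c < 0: then a ≤ entry < a + c < a, contradiction
            omega

lemma solutionLoop_nonpos (hit : Int) (s : List Int) (t : Int) (ht : t ≤ 0) :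
    solutionLoop hit s t = 0 := by
  cases s with
  | nil => rfl
  | cons h rest => simp [solutionLoop, show ¬ (0 < t) by omega]

-- a list split at r: r entries ≤ x then entries > x has countP (≤ x) = r
lemma countP_split (x : Int) :
    ∀ (l : List Int) (r : Nat), r ≤ l.length →
      (∀ i (h : i < l.length), i < r → l[i] ≤ x) →
      (∀ i (h : i < l.length), r ≤ i → x < l[i]) →
      l.countP (fun v => decide (v ≤ x)) = r := by
  intro l
  induction l with
  | nil => intro r hr _ _; simp [Nat.le_zero.mp hr]
  | cons y l ih =>
    intro r hr hlo hhi
    cases r with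
    | zero =>
      have : ∀ v ∈ y :: l, ¬ (decide (v ≤ x) = true) := by
        intro v hv
        rcases List.mem_iff_getElem.mp hv with ⟨i, hilt, rfl⟩
        have := hhi i hilt (Nat.zero_le _)
        simp; omega
      simpa using List.countP_eq_zero.mpr this
    | succ r =>
      have hy : y ≤ x := by
        have := hlo 0 (by simp) (Nat.succ_pos _); simpa using this
      have htail : l.countP (fun v => decide (v ≤ x)) = r := by
        apply ih r (by simpa using hr)
        · intro i hi hir
          have := hlo (i + 1) (by simpa using Nat.succ_lt_succ hi) (Nat.succ_lt_succ hir)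
          simpa using this
        · intro i hi hir
          have := hhi (i + 1) (by simpa using Nat.succ_lt_succ hi) (Nat.succ_le_succ hir)
          simpa using this
      simp [htail, hy]

-- invariant proof for Python's bisect_right loop, needing only that "above x" is
-- upward closed along the list (true for our valley-shaped prefix sums), not full sortedness
lemma bisectLoop_inv (xs : List Int) (x : Int)
    (hup : ∀ i j (hi : i < xs.length) (hj : j < xs.length), i ≤ j → x < xs[i] → x < xs[j]) :
    ∀ (fuel lo hi : Nat), lo ≤ hi → hi ≤ xs.length → hi - lo ≤ fuel →
      (∀ i (h : i < xs.length), i < lo → xs[i] ≤ x) →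
      (∀ i (h : i < xs.length), hi ≤ i → x < xs[i]) →
      PySem.List.bisectRightLoop xs x fuel lo hi = xs.countP (fun v => decide (v ≤ x)) := by
  intro fuel
  induction fuel with
  | zero =>
    intro lo hi hlohi hhil hfuel hlo hhi
    have : lo = hi := by omega
    subst this
    simpa [PySem.List.bisectRightLoop] using (countP_split x xs lo hhil hlo hhi).symm
  | succ n ih =>
    intro lo hi hlohi hhil hfuel hlo hhi
    by_cases hlt : lo < hi
    · have hmidlt : (lo + hi) / 2 < xs.length := by omega
      have hget : xs[(lo + hi) / 2]? = some (xs[(lo + hi) / 2]'hmidlt) :=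
        List.getElem?_eq_getElem hmidlt
      simp only [PySem.List.bisectRightLoop, hlt, if_true, hget]
      by_cases hx : x < xs[(lo + hi) / 2]'hmidlt
      · simp only [hx, if_true]
        apply ih lo ((lo + hi) / 2) (by omega) (by omega) (by omega) hlo
        intro i h hi'
        exact hup _ i hmidlt h hi' hx
      · simp only [hx, if_false]
        apply ih ((lo + hi) / 2 + 1) hi (by omega) hhil (by omega)
        · intro i h hi'
          by_contra hgt
          push_neg at hgt
          exact hx (hup i _ h hmidlt (by omega) hgt)
        · exact hhi
    · have : lo = hi := by omega
      subst this
      simpa [PySem.List.bisectRightLoop] using (countP_split x xs lo hhil hlo hhi).symm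

lemma bisect_eq_countP (xs : List Int) (x : Int)
    (hup : ∀ i j (hi : i < xs.length) (hj : j < xs.length), i ≤ j → x < xs[i] → x < xs[j]) :
    PySem.List.bisectRight xs x = xs.countP (fun v => decide (v ≤ x)) := by
  unfold PySem.List.bisectRight
  exact bisectLoop_inv xs x hup xs.length 0 xs.length (Nat.zero_le _) le_rfl (by omega)
    (by intro i h hi; omega) (by intro i h hi; omega)

-- A's greedy loop counts exactly the prefix sums that fit in the budget
lemma loop_eq_countP (hit : Int) (t : Int) :
    ∀ (s : List Int), (s.map (fun h => pvCeil h hit)).Pairwise (· ≤ ·) →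
      ∀ (a : Int), a < t →
        solutionLoop hit s (t - a) =
          ((pvAcc a (s.map (fun h => pvCeil h hit))).countP (fun v => decide (v ≤ t)) : Int) := by
  intro s
  induction s with
  | nil => intro _ a _; simp [solutionLoop, pvAcc]
  | cons h rest ih =>
    intro hp a hat
    rw [List.map_cons] at hp
    rcases List.pairwise_cons.mp hp with ⟨hhead, htail⟩
    have hpos : 0 < t - a := by omega
    simp only [List.map_cons, pvAcc, List.countP_cons]
    by_cases hle : pvCeil h hit ≤ t - a
    · have hax : a + pvCeil h hit ≤ t := by omega
      by_cases hlt : a + pvCeil h hit < t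
      · have := ih htail (a + pvCeil h hit) hlt
        simp only [solutionLoop, hpos, if_true, hle, if_true]
        rw [show t - a - pvCeil h hit = t - (a + pvCeil h hit) by ring, this]
        simp [hax]

        ring
      · -- budget exactly exhausted: nothing further fits
        have hteq : t ≤ a + pvCeil h hit := by omega
        have hc1 : (1:Int) ≤ pvCeil h hit := by omega
        have hall1 : ∀ c ∈ rest.map (fun h => pvCeil h hit), (1:Int) ≤ c := by
          intro c hc
          rcases List.mem_map.mp hc with ⟨y, hy, rfl⟩
          exact le_trans hc1 (hhead _ (List.mem_map.mpr ⟨y, hy, rfl⟩))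
        have hzero : (pvAcc (a + pvCeil h hit) (rest.map (fun h => pvCeil h hit))).countP
            (fun v => decide (v ≤ t)) = 0 := by
          apply List.countP_eq_zero.mpr
          intro v hv
          have := pvAcc_mem_ge _ _ hall1 v hv
          simp; omega
        simp only [solutionLoop, hpos, if_true, hle, if_true]
        rw [solutionLoop_nonpos hit rest _ (by omega), hzero]
        simp [hax]
    · -- first monster already does not fit
      have hcgt : t < a + pvCeil h hit := by omega
      have hc1 : (1:Int) ≤ pvCeil h hit := by omega
      have hall1 : ∀ c ∈ rest.map (fun h => pvCeil h hit), (1:Int) ≤ c := by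
        intro c hc
        rcases List.mem_map.mp hc with ⟨y, hy, rfl⟩
        exact le_trans hc1 (hhead _ (List.mem_map.mpr ⟨y, hy, rfl⟩))
      have hzero : (pvAcc (a + pvCeil h hit) (rest.map (fun h => pvCeil h hit))).countP
          (fun v => decide (v ≤ t)) = 0 := by
        apply List.countP_eq_zero.mpr
        intro v hv
        have := pvAcc_mem_ge _ _ hall1 v hv
        simp; omega
      simp only [solutionLoop, hpos, if_true, hle, if_false]
      rw [hzero]
      simp [show ¬ (a + pvCeil h hit ≤ t) by omega]

-- ceiling division by a positive hit is monotone in the health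
lemma pvCeil_mono (hit : Int) (hhit : 0 < hit) {h1 h2 : Int} (hle : h1 ≤ h2) :
    pvCeil h1 hit ≤ pvCeil h2 hit := by
  unfold pvCeil
  have e1 := PySem.Int.floordiv_eq_ediv_of_pos (a := -h1) hhit
  have e2 := PySem.Int.floordiv_eq_ediv_of_pos (a := -h2) hhit
  rw [e1, e2]
  have := Int.ediv_le_ediv hhit (show -h2 ≤ -h1 by omega)
  omega

-- ===== VERDICT (by name: the statement is the Claim_ definition above) =====
theorem solution_spec : Claim_equal_solution := by
  intro healths hit t _ hpre
  unfold Spec_solution solution solution_alt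
  have hhit : (0:Int) < hit := hpre
  set s := PySem.List.sorted healths (fun x => x) with hs
  by_cases ht : t ≤ 0
  · simp only [ht, if_true]
    exact solutionLoop_nonpos hit s t ht
  · simp only [show ¬ t ≤ 0 by omega, if_false]
    have hpair : (s.map (fun h => pvCeil h hit)).Pairwise (· ≤ ·) := by
      apply List.pairwise_map.mpr
      exact (PySem.List.sorted_pairwise healths (fun x => x)).imp
        (fun hab => pvCeil_mono hit hhit hab)
    set cs := s.map (fun h => pvCeil h hit) with hcs
    have hup : ∀ i j (hi : i < (pvAcc 0 cs).length) (hj : j < (pvAcc 0 cs).length),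
        i ≤ j → t < (pvAcc 0 cs)[i] → t < (pvAcc 0 cs)[j] := by
      intro i j hi hj hij hti
      have h0 : (0:Int) ≤ (pvAcc 0 cs)[i] := by omega
      have := pvAcc_valley cs hpair 0 i j hi hj hij h0
      omega
    rw [bisect_eq_countP (pvAcc 0 cs) t hup]
    have := loop_eq_countP hit t s hpair 0 (by omega)
    simpa using this
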